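-- pv_equiv track=rewrite | github.com/Iori-Pimentel/aoc-progress | python/2023/2023-13-code.py | finding_mistake
-- ===== SOURCE A (Python) =====
-- def finding_mistake(pattern, mistake=1):
--     for mirror in range(1, len(pattern)):
--         if sum(sum(a != b for a, b in zip(pattern[before], pattern[after]))
--             for offset in range(mirror)
--             for before, after in [[mirror - offset - 1, mirror + offset]]
--             if before >= 0 and after < len(pattern)
--         ) == mistake: return mirror
--
--     return 0
-- ===== SOURCE B (Python) =====
-- def finding_mistake(pattern, mistake=1):
--     n = len(pattern)
--     totals = [0] * n
--     for j in range(n):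
--         for i in range(j):
--             if (i + j) % 2 == 1:
--                 k = (i + j + 1) // 2
--                 totals[k] += sum(a != b for a, b in zip(pattern[i], pattern[j]))
--     for mirror in range(1, n):
--         if totals[mirror] == mistake:
--             return mirror
--     return 0
-- ===== Notes on version B (the rewrite author's own statement) =====
-- stated objective: alternative
-- what changed: A rescans, for every candidate mirror, all reflected row pairs and sums their Hamming distances; B makes a single scatter pass over all index pairs i<j, accumulating each pair's Hamming distance into a bucket array indexed by the implied mirror (i+j+1)//2, then scans the buckets for the first mirror whose total equals mistake.
import Mathlib
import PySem

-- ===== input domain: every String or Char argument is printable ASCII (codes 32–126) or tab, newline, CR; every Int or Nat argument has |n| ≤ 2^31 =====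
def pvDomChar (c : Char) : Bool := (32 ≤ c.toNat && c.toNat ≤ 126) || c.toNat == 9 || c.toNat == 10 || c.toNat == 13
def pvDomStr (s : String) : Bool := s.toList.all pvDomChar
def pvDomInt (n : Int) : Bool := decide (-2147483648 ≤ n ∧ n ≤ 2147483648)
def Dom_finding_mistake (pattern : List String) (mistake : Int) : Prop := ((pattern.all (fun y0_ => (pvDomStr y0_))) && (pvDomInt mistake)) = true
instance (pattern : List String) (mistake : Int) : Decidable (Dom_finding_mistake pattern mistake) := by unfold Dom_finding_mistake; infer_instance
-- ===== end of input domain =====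

-- B replaces A's gather-per-mirror quadratic rescan by one scatter pass over index pairs
-- into a bucket array, then a flat lookup scan (alternative decomposition; same result).

-- ===== PORT A =====
-- sum(a != b for a, b in zip(x, y))
def pvHam (x y : String) : Int :=
  (x.toList.zip y.toList).foldl (fun s p => s + (if p.1 ≠ p.2 then 1 else 0)) 0

-- the inner generator sum for one candidate mirror
def pvInner (pattern : List String) (mirror : Int) : Int :=
  (PySem.List.pyRange 0 mirror 1).foldl (fun s offset =>
    let before := mirror - offset - 1
    let after := mirror + offset
    if 0 ≤ before ∧ after < (pattern.length : Int) then
      s + pvHam (PySem.List.pyGetD pattern before "") (PySem.List.pyGetD pattern after "")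
    else s) 0

-- the for-loop with early return
def pvALoop (pattern : List String) (mistake : Int) : List Int → Int
  | [] => 0
  | m :: rest => if pvInner pattern m = mistake then m else pvALoop pattern mistake rest

def finding_mistake (pattern : List String) (mistake : Int) : Int :=
  pvALoop pattern mistake (PySem.List.pyRange 1 (pattern.length : Int) 1)

-- ===== PORT B =====
-- body of B's inner loop: maybe add the Hamming distance of rows i, j into bucket (i+j+1)//2
def pvStep (pattern : List String) (j : Int) (t : List Int) (i : Int) : List Int :=
  if PySem.Int.mod (i + j) 2 = 1 then
    let k := (PySem.Int.floordiv (i + j + 1) 2).toNat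
    t.set k (t.getD k 0 + pvHam (PySem.List.pyGetD pattern i "") (PySem.List.pyGetD pattern j ""))
  else t

-- totals after the scatter pass over all pairs i < j
def pvTotals (pattern : List String) : List Int :=
  (PySem.List.pyRange 0 (pattern.length : Int) 1).foldl
    (fun t j => (PySem.List.pyRange 0 j 1).foldl (pvStep pattern j) t)
    (List.replicate pattern.length 0)

-- B's final scan with early return
def pvBScan (totals : List Int) (mistake : Int) : List Int → Int
  | [] => 0
  | m :: rest => if totals.getD m.toNat 0 = mistake then m else pvBScan totals mistake rest

def finding_mistake_alt (pattern : List String) (mistake : Int) : Int :=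
  pvBScan (pvTotals pattern) mistake (PySem.List.pyRange 1 (pattern.length : Int) 1)

-- ===== PRECONDITION & SPEC =====
def Spec_finding_mistake (pattern : List String) (mistake : Int) (out : Int) : Prop := out = finding_mistake_alt pattern mistake
instance (pattern : List String) (mistake : Int) (out : Int) : Decidable (Spec_finding_mistake pattern mistake out) := by unfold Spec_finding_mistake; infer_instance

-- ===== CLAIM (what is proved, stated in full; the proofs are below) =====
def Claim_equal_finding_mistake : Prop := ∀ (pattern : List String) (mistake : Int), Dom_finding_mistake pattern mistake → Spec_finding_mistake pattern mistake (finding_mistake pattern mistake)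

-- ===== LEMMAS AND PROOFS =====

theorem pvSumRange (N : Nat) (f : Nat → Int) :
    ((List.range N).map f).sum = ∑ t ∈ Finset.range N, f t := by
  induction N with
  | zero => simp
  | succ n ih => simp [List.range_succ, Finset.sum_range_succ, ih]

-- the amount pvStep adds into bucket k
def pvContrib (pattern : List String) (j : Int) (k : Nat) (i : Int) : Int :=
  if PySem.Int.mod (i + j) 2 = 1 ∧ (PySem.Int.floordiv (i + j + 1) 2).toNat = k then
    pvHam (PySem.List.pyGetD pattern i "") (PySem.List.pyGetD pattern j "")
  else 0

theorem pvStep_length (pattern : List String) (j : Int) (t : List Int) (i : Int) :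
    (pvStep pattern j t i).length = t.length := by
  unfold pvStep; split <;> simp

theorem pvStep_getD (pattern : List String) (j : Int) (t : List Int) (i : Int)
    (k : Nat) (hk : k < t.length) :
    (pvStep pattern j t i).getD k 0 = t.getD k 0 + pvContrib pattern j k i := by
  unfold pvStep pvContrib
  by_cases hm : PySem.Int.mod (i + j) 2 = 1
  · by_cases he : (PySem.Int.floordiv (i + j + 1) 2).toNat = k
    · rw [if_pos hm, if_pos ⟨hm, he⟩, he]
      simp [List.getD_eq_getElem?_getD, hk]
    · rw [if_pos hm, if_neg (by tauto)]
      simp only [List.getD_eq_getElem?_getD, List.getElem?_set_ne he, add_zero]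
  · rw [if_neg hm, if_neg (by tauto)]; ring

theorem pvFoldI_length (pattern : List String) (j : Int) (is : List Int) (t : List Int) :
    (is.foldl (pvStep pattern j) t).length = t.length := by
  induction is generalizing t with
  | nil => rfl
  | cons i is ih => simp [List.foldl, ih, pvStep_length]

theorem pvFoldI_getD (pattern : List String) (j : Int) (is : List Int) (t : List Int)
    (k : Nat) (hk : k < t.length) :
    (is.foldl (pvStep pattern j) t).getD k 0 =
      t.getD k 0 + (is.map (pvContrib pattern j k)).sum := by
  induction is generalizing t with
  | nil => simp
  | cons i is ih =>
      simp only [List.foldl, List.map, List.sum_cons]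
      rw [ih _ (by rw [pvStep_length]; exact hk), pvStep_getD pattern j t i k hk]
      ring

theorem pvFoldJ_getD (pattern : List String) (js : List Int) (t : List Int)
    (k : Nat) (hk : k < t.length) :
    (js.foldl (fun t j => (PySem.List.pyRange 0 j 1).foldl (pvStep pattern j) t) t).getD k 0 =
      t.getD k 0 +
      (js.map (fun j => ((PySem.List.pyRange 0 j 1).map (pvContrib pattern j k)).sum)).sum := by
  induction js generalizing t with
  | nil => simp
  | cons j js ih =>
      simp only [List.foldl, List.map, List.sum_cons]
      rw [ih _ (by rw [pvFoldI_length]; exact hk), pvFoldI_getD pattern j _ t k hk]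
      ring

theorem pvTotals_getD (pattern : List String) (k : Nat) (hk : k < pattern.length) :
    (pvTotals pattern).getD k 0 =
      ((PySem.List.pyRange 0 (pattern.length : Int) 1).map
        (fun j => ((PySem.List.pyRange 0 j 1).map (pvContrib pattern j k)).sum)).sum := by
  unfold pvTotals
  rw [pvFoldJ_getD pattern _ _ k (by simpa using hk)]
  simp

theorem pvSum_map_ite_eq (f : Int → Int) (l : List Int) (hl : l.Nodup) (c : Int) :
    (l.map (fun i => if i = c then f i else 0)).sum = if c ∈ l then f c else 0 := by
  induction l with
  | nil => simp
  | cons x l ih =>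
      simp only [List.map, List.sum_cons, ih hl.of_cons]
      rcases List.nodup_cons.mp hl with ⟨hx, _⟩
      by_cases h : x = c
      · subst h; simp [hx]
      · simp [h, Ne.symm h, List.mem_cons]

-- inner scatter sum for a fixed j collapses to at most one pair
theorem pvInnerSum_collapse (pattern : List String) (j : Int) (k : Nat) (_hj : 0 ≤ j) (hk : 1 ≤ k) :
    ((PySem.List.pyRange 0 j 1).map (pvContrib pattern j k)).sum =
      if (k : Int) ≤ j ∧ j ≤ 2 * (k : Int) - 1 then
        pvHam (PySem.List.pyGetD pattern (2 * (k : Int) - 1 - j) "") (PySem.List.pyGetD pattern j "")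
      else 0 := by
  have hcong : ∀ i ∈ PySem.List.pyRange 0 j 1, pvContrib pattern j k i =
      (fun i => if i = 2 * (k : Int) - 1 - j then
        pvHam (PySem.List.pyGetD pattern i "") (PySem.List.pyGetD pattern j "") else 0) i := by
    intro i hi
    rcases PySem.List.mem_pyRange_one.mp hi with ⟨hi0, hij⟩
    unfold pvContrib
    rw [PySem.Int.mod_eq_emod_of_pos (by norm_num), PySem.Int.floordiv_eq_ediv_of_pos (by norm_num)]
    by_cases hic : i = 2 * (k : Int) - 1 - j
    · rw [if_pos (by omega)]; simp [hic]
    · rw [if_neg (by omega)]; simp [hic]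
  rw [List.map_congr_left hcong,
      pvSum_map_ite_eq _ _ (PySem.List.nodup_pyRange_one 0 j) (2 * (k : Int) - 1 - j)]
  simp only [PySem.List.mem_pyRange_one]
  split_ifs with h1 h2 <;> first | rfl | omega

theorem pvInner_as_sum (pattern : List String) (m : Int) :
    pvInner pattern m =
      ((PySem.List.pyRange 0 m 1).map (fun o =>
        if 0 ≤ m - o - 1 ∧ m + o < (pattern.length : Int) then
          pvHam (PySem.List.pyGetD pattern (m - o - 1) "") (PySem.List.pyGetD pattern (m + o) "")
        else 0)).sum := by
  unfold pvInner
  trans ((PySem.List.pyRange 0 m 1).foldl (fun s o =>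
      s + (if 0 ≤ m - o - 1 ∧ m + o < (pattern.length : Int) then
        pvHam (PySem.List.pyGetD pattern (m - o - 1) "") (PySem.List.pyGetD pattern (m + o) "")
        else 0)) 0)
  · exact PySem.List.foldl_congr_mem _ _ _ _ (fun acc x _ => by dsimp only; split_ifs <;> simp)
  · rw [PySem.List.foldl_add]; simp

theorem pvTotals_eq_inner (pattern : List String) (m : Int)
    (h1 : 1 ≤ m) (h2 : m < (pattern.length : Int)) :
    (pvTotals pattern).getD m.toNat 0 = pvInner pattern m := by
  have hcast : ((m.toNat : Int)) = m := Int.toNat_of_nonneg (by omega)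
  rw [pvTotals_getD pattern m.toNat (by omega), pvInner_as_sum,
      List.map_congr_left (fun j hj => pvInnerSum_collapse pattern j m.toNat
        (by rcases PySem.List.mem_pyRange_one.mp hj with ⟨h, _⟩; exact h) (by omega))]
  rw [PySem.List.pyRange_one 0 (pattern.length : Int), PySem.List.pyRange_one 0 m]
  simp only [List.map_map, zero_add, hcast]
  rw [pvSumRange, pvSumRange]
  have e1 : (((pattern.length : Int) - 0).toNat) = pattern.length := by omega
  have e2 : ((m - 0).toNat) = m.toNat := by omega
  rw [e1, e2]
  simp only [Function.comp_apply]
  rw [← Finset.sum_filter, ← Finset.sum_filter]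
  refine Finset.sum_nbij' (fun t => t - m.toNat) (fun o => m.toNat + o) ?_ ?_ ?_ ?_ ?_
  · intro a ha
    simp only [Finset.mem_filter, Finset.mem_range] at ha ⊢
    omega
  · intro a ha
    simp only [Finset.mem_filter, Finset.mem_range] at ha ⊢
    omega
  · intro a ha
    simp only [Finset.mem_filter, Finset.mem_range] at ha
    dsimp only
    omega
  · intro a ha
    simp only [Finset.mem_filter, Finset.mem_range] at ha
    dsimp only
    omega
  · intro a ha
    simp only [Finset.mem_filter, Finset.mem_range] at ha
    have e : (((a - m.toNat : ℕ) : Int)) = (a : Int) - m := by omega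
    rw [e, show m - ((a : Int) - m) - 1 = 2 * m - 1 - (a : Int) from by ring,
        show m + ((a : Int) - m) = (a : Int) from by ring]

theorem pvScan_eq (pattern : List String) (mistake : Int) (ms : List Int)
    (h : ∀ m ∈ ms, (pvTotals pattern).getD m.toNat 0 = pvInner pattern m) :
    pvALoop pattern mistake ms = pvBScan (pvTotals pattern) mistake ms := by
  induction ms with
  | nil => rfl
  | cons m ms ih =>
      simp only [pvALoop, pvBScan, h m (List.mem_cons_self ..)]
      rw [ih (fun x hx => h x (List.mem_cons_of_mem _ hx))]

-- ===== VERDICT (by name: the statement is the Claim_ definition above) =====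
theorem finding_mistake_spec : Claim_equal_finding_mistake := by
  intro pattern mistake _
  unfold Spec_finding_mistake finding_mistake finding_mistake_alt
  apply pvScan_eq
  intro m hm
  rcases (PySem.List.mem_pyRange_one).mp hm with ⟨h1, h2⟩
  exact pvTotals_eq_inner pattern m h1 h2
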